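-- pv_equiv track=rewrite | github.com/HeyJunie/GroupStudy | 03_28/03_28_01.py | function
-- ===== SOURCE A (Python) =====
-- def function(p, case_arr):
--
--     for i in p:
--         if i == 'R':
--             case_arr = case_arr[::-1]
--         else:
--             if len(case_arr) < 1:
--                 break
--             else:
--                 case_arr.pop(0)
--     return case_arr
-- ===== SOURCE B (Python) =====
-- def function(p, case_arr):
--     lo, hi, rev = 0, len(case_arr), False
--     for i in p:
--         if i == 'R':
--             rev = not rev
--         else:
--             if hi - lo < 1:
--                 break
--             if rev:
--                 hi -= 1
--             else:
--                 lo += 1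
--     res = case_arr[lo:hi]
--     return res[::-1] if rev else res
-- ===== Notes on version B (the rewrite author's own statement) =====
-- stated objective: faster
-- what changed: Instead of physically reversing and popping the list for every command, B keeps a direction flag and two index pointers and materialises the surviving slice (reversed if needed) once at the end.
import Mathlib
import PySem

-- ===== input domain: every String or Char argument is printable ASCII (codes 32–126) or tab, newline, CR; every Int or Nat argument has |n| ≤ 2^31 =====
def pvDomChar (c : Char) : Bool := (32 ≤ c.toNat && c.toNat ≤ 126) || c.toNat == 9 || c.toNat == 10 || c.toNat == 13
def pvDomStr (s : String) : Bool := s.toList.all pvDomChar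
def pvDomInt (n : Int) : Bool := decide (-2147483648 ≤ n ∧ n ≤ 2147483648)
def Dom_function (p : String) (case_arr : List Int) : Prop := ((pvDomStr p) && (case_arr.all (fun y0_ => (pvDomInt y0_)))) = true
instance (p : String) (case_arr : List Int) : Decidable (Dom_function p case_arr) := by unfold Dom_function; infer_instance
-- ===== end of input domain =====

-- B replaces per-command list reversal/popping by a direction flag and two pointers,
-- building the surviving slice once at the end (faster, asymptotic in a timing run).
-- A mutates its list argument via pop(0); the equivalence proved here is about the RETURN value only.

-- ===== PORT A =====
-- literal loop of A: reverse on 'R', otherwise break if empty else pop(0)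
def functionLoopA : List Char → List Int → List Int
  | [], arr => arr
  | c :: cs, arr =>
    if c = 'R' then functionLoopA cs arr.reverse
    else if arr.length < 1 then arr
    else match PySem.List.pop? arr 0 with
      | some (_, rest) => functionLoopA cs rest
      | none => arr

def function (p : String) (case_arr : List Int) : List Int :=
  functionLoopA p.toList case_arr

-- ===== PORT B =====
-- literal loop of B: two pointers lo/hi and a reversal flag
def functionLoopB : List Char → Int → Int → Bool → Int × Int × Bool
  | [], lo, hi, rev => (lo, hi, rev)
  | c :: cs, lo, hi, rev =>
    if c = 'R' then functionLoopB cs lo hi (!rev)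
    else if hi - lo < 1 then (lo, hi, rev)
    else if rev then functionLoopB cs lo (hi - 1) rev
    else functionLoopB cs (lo + 1) hi rev

def function_alt (p : String) (case_arr : List Int) : List Int :=
  let s := functionLoopB p.toList 0 (case_arr.length : Int) false
  let res := PySem.List.slice case_arr (some s.1) (some s.2.1)
  if s.2.2 then res.reverse else res

-- ===== PRECONDITION & SPEC =====
def Spec_function (p : String) (case_arr : List Int) (out : List Int) : Prop := out = function_alt p case_arr
instance (p : String) (case_arr : List Int) (out : List Int) : Decidable (Spec_function p case_arr out) := by unfold Spec_function; infer_instance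

-- ===== CLAIM (what is proved, stated in full; the proofs are below) =====
def Claim_equal_function : Prop := ∀ (p : String) (case_arr : List Int), Dom_function p case_arr → Spec_function p case_arr (function p case_arr)

-- ===== LEMMAS AND PROOFS =====

-- the value B would reconstruct from a pointer state
def pvView (arr : List Int) (s : Int × Int × Bool) : List Int :=
  let res := PySem.List.slice arr (some s.1) (some s.2.1)
  if s.2.2 then res.reverse else res

lemma pvView_nat (arr : List Int) (a b : Nat) (rev : Bool) :
    pvView arr ((a : Int), (b : Int), rev)
      = (if rev then ((arr.drop a).take (b - a)).reverse else (arr.drop a).take (b - a)) := by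
  simp [pvView, PySem.List.slice_natCast]

lemma pvTailTake (l : List Int) (n : Nat) : (l.take n).tail = l.tail.take (n - 1) := by
  induction l with
  | nil => simp
  | cons x xs ih =>
    cases n with
    | zero => simp
    | succ m => simp

lemma pvDropLastTake (l : List Int) (n : Nat) (h : n ≤ l.length) :
    (l.take n).dropLast = l.take (n - 1) := by
  rcases Nat.lt_or_ge n l.length with hlt | hge
  · exact List.dropLast_take hlt
  · have : n = l.length := by omega
    subst this
    simp [List.dropLast_eq_take]

lemma pvLoop_invariant (cs : List Char) (arr : List Int) (a b : Nat) (rev : Bool)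
    (hab : a ≤ b) (hb : b ≤ arr.length) :
    functionLoopA cs (pvView arr ((a : Int), (b : Int), rev))
      = pvView arr (functionLoopB cs (a : Int) (b : Int) rev) := by
  induction cs generalizing a b rev with
  | nil => simp [functionLoopA, functionLoopB]
  | cons c cs ih =>
    by_cases hR : c = 'R'
    · have hrev : (pvView arr ((a : Int), (b : Int), rev)).reverse
          = pvView arr ((a : Int), (b : Int), !rev) := by
        cases rev <;> simp [pvView_nat]
      simp only [functionLoopA, functionLoopB, if_pos hR, hrev]
      exact ih a b (!rev) hab hb
    · by_cases hemp : b - a = 0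
      · have hlen : (pvView arr ((a : Int), (b : Int), rev)).length < 1 := by
          cases rev <;> simp [pvView_nat, hemp] <;> omega
        have hlt : (b : Int) - (a : Int) < 1 := by omega
        simp [functionLoopA, functionLoopB, hR, hlen, hlt]
      · -- a < b: a pop happens on both sides
        have halt : a < b := by omega
        have hlt : ¬ ((b : Int) - (a : Int) < 1) := by omega
        set v := pvView arr ((a : Int), (b : Int), rev) with hv
        have hvlen : v.length = b - a := by
          cases rev <;> simp [hv, pvView_nat] <;> omega
        have hvne : v ≠ [] := by
          intro h; rw [h] at hvlen; simp at hvlen; omega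
        obtain ⟨x, xs, hxs⟩ := List.exists_cons_of_ne_nil hvne
        have hpop : PySem.List.pop? v 0 = some (x, v.tail) := by
          rw [hxs]; simp [PySem.List.pop?_zero_cons]
        have hnotlen : ¬ (v.length < 1) := by omega
        simp only [functionLoopA, functionLoopB, if_neg hR, if_neg hnotlen, if_neg hlt, hpop]
        cases rev with
        | true =>
          have htail : v.tail = pvView arr ((a : Int), ((b - 1 : Nat) : Int), true) := by
            rw [hv]
            simp only [pvView_nat, if_true]
            rw [List.tail_reverse, pvDropLastTake _ _ (by simp; omega)]
            congr 2
            omega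
          rw [htail]
          have hc : ((b : Int) - 1) = ((b - 1 : Nat) : Int) := by omega
          rw [hc]
          exact ih a (b - 1) true (by omega) (by omega)
        | false =>
          have htail : v.tail = pvView arr (((a + 1 : Nat) : Int), (b : Int), false) := by
            rw [hv]
            simp only [pvView_nat, Bool.false_eq_true, if_false]
            rw [pvTailTake, List.tail_drop]
            congr 1
          rw [htail]
          simp only [Bool.false_eq_true, if_false]
          have hc : ((a : Int) + 1) = ((a + 1 : Nat) : Int) := by omega
          rw [hc]
          exact ih (a + 1) b false (by omega) (by omega)

-- ===== VERDICT (by name: the statement is the Claim_ definition above) =====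
theorem function_spec : Claim_equal_function := by
  intro p case_arr _
  unfold Spec_function function function_alt
  have h := pvLoop_invariant p.toList case_arr 0 case_arr.length false
    (Nat.zero_le _) (le_refl _)
  have h0 : pvView case_arr ((0 : Int), (case_arr.length : Int), false) = case_arr := by
    simp [pvView, PySem.List.slice_zero_start, PySem.List.slice_to_natCast]
  rw [Int.ofNat_zero] at h
  rw [h0] at h
  rw [h]
  rfl
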